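-- pv_equiv track=rewrite | github.com/CazouVilela/conector_airbyte_xlsx_drive | source_google_sheets_xlsx/source.py | strip_trailing_none_columns
-- ===== SOURCE A (Python) =====
-- from typing import Any, Optional
--
-- def strip_trailing_none_columns(
--     headers: list[str], rows: list[list[Any]]
-- ) -> tuple[list[str], list[list[Any]]]:
--     """Remove trailing columns where header is empty and all data is None."""
--     if not headers:
--         return headers, rows
--
--     last_valid = len(headers) - 1
--     while last_valid >= 0:
--         header_empty = not headers[last_valid] or headers[last_valid].strip() == ""
--         if not header_empty:
--             break
--         all_none = all(
--             (col_idx >= len(row) or row[col_idx] is None)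
--             for row in rows
--             for col_idx in [last_valid]
--         )
--         if not all_none:
--             break
--         last_valid -= 1
--
--     cut = last_valid + 1
--     return headers[:cut], [row[:cut] for row in rows]
-- ===== SOURCE B (Python) =====
-- from typing import Any
--
--
-- def strip_trailing_none_columns(
--     headers: list[str], rows: list[list[Any]]
-- ) -> tuple[list[str], list[list[Any]]]:
--     """Remove trailing columns where header is empty and all data is None."""
--     if not headers:
--         return headers, rows
--
--     n = len(headers)
--     col_has_data = [False] * n
--     for row in rows:
--         for j in range(min(n, len(row))):
--             if row[j] is not None:
--                 col_has_data[j] = True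
--
--     cut = 0
--     for j in range(n):
--         if (headers[j] and headers[j].strip() != "") or col_has_data[j]:
--             cut = j + 1
--
--     return headers[:cut], [row[:cut] for row in rows]
-- ===== Notes on version B (the rewrite author's own statement) =====
-- stated objective: alternative
-- what changed: Replaces A's backward while-loop that re-scans all rows per candidate column with a single forward pass building a col_has_data boolean table once, then a left-to-right scan computing the cut point.
import Mathlib
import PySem

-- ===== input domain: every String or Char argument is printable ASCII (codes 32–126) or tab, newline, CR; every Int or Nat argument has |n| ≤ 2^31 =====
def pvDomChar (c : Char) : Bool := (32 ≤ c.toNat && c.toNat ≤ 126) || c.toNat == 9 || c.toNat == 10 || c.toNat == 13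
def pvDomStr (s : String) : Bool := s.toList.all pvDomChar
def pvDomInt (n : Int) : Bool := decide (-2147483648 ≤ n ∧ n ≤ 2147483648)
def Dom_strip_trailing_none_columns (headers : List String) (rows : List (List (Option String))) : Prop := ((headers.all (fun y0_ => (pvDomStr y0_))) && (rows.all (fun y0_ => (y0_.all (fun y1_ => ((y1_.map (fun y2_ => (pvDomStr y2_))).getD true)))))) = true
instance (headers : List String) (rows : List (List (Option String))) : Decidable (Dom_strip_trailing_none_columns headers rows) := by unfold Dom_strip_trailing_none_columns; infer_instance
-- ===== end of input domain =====

-- B replaces A's backward while-loop (which re-scans every row once per trailing candidate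
-- column) with one forward pass building a col_has_data table plus one left-to-right scan
-- for the cut point; same return value, neither version mutates its arguments.

-- ===== PORT A =====
-- A's while-loop over last_valid, indexed here by c = last_valid + 1 (c = 0 ↔ last_valid = -1).
def stripLoopA (headers : List String) (rows : List (List (Option String))) : Nat → Nat
  | 0 => 0
  | c + 1 =>
    let h := headers.getD c ""
    let header_empty := (h == "") || (PySem.Str.strip h == "")
    if !header_empty then c + 1
    else
      let all_none := rows.all (fun row => decide (row.length ≤ c) || (row.getD c none == none))
      if !all_none then c + 1
      else stripLoopA headers rows c

def strip_trailing_none_columns (headers : List String) (rows : List (List (Option String))) : List String × List (List (Option String)) :=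
  if headers = [] then (headers, rows)
  else
    let cut := stripLoopA headers rows headers.length
    (headers.take cut, rows.map (fun row => row.take cut))

-- ===== PORT B =====
def strip_trailing_none_columns_alt (headers : List String) (rows : List (List (Option String))) : List String × List (List (Option String)) :=
  if headers = [] then (headers, rows)
  else
    let n := headers.length
    let colHasData := rows.foldl
      (fun acc row =>
        (List.range (min n row.length)).foldl
          (fun acc j => if (row.getD j none).isSome then acc.set j true else acc) acc)
      (List.replicate n false)
    let cut := (List.range n).foldl
      (fun cut j =>
        if ((headers.getD j "" != "") && (PySem.Str.strip (headers.getD j "") != ""))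
            || colHasData.getD j false
        then j + 1 else cut) 0
    (headers.take cut, rows.map (fun row => row.take cut))

-- ===== PRECONDITION & SPEC =====
def Spec_strip_trailing_none_columns (headers : List String) (rows : List (List (Option String))) (out : List String × List (List (Option String))) : Prop := out = strip_trailing_none_columns_alt headers rows
instance (headers : List String) (rows : List (List (Option String))) (out : List String × List (List (Option String))) : Decidable (Spec_strip_trailing_none_columns headers rows out) := by unfold Spec_strip_trailing_none_columns; infer_instance

-- ===== CLAIM (what is proved, stated in full; the proofs are below) =====
def Claim_equal_strip_trailing_none_columns : Prop := ∀ (headers : List String) (rows : List (List (Option String))), Dom_strip_trailing_none_columns headers rows → Spec_strip_trailing_none_columns headers rows (strip_trailing_none_columns headers rows)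

-- ===== LEMMAS AND PROOFS =====

-- greatest c ≤ n with c = 0 or p (c-1)
def cutAux (p : Nat → Bool) : Nat → Nat
  | 0 => 0
  | c + 1 => if p c then c + 1 else cutAux p c

-- "column j is kept": meaningful header, or some row has a non-None value at j.
def goodCol (headers : List String) (rows : List (List (Option String))) (j : Nat) : Bool :=
  ((headers.getD j "" != "") && (PySem.Str.strip (headers.getD j "") != ""))
    || rows.any (fun row => decide (j < row.length) && (row.getD j none).isSome)

theorem not_all_none_eq_any (rows : List (List (Option String))) (c : Nat) :
    (!(rows.all fun row => decide (row.length ≤ c) || (row.getD c none == none)))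
    = rows.any (fun row => decide (c < row.length) && (row.getD c none).isSome) := by
  rw [List.all_eq_not_any_not]
  simp only [Bool.not_not]
  refine List.any_congr rfl (fun row => ?_)
  by_cases hl : c < row.length
  · cases h : row.getD c none <;> simp [hl, Nat.not_le.mpr hl]
  · simp [hl, Nat.not_lt.mp hl]

theorem goodCol_eq (headers : List String) (rows : List (List (Option String))) (c : Nat) :
    goodCol headers rows c
      = ((!((headers.getD c "" == "") || (PySem.Str.strip (headers.getD c "") == "")))
          || (!(rows.all fun row => decide (row.length ≤ c) || (row.getD c none == none)))) := by
  unfold goodCol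
  rw [not_all_none_eq_any, Bool.not_or]
  rfl

theorem stripLoopA_eq_cutAux (headers : List String) (rows : List (List (Option String))) (c : Nat) :
    stripLoopA headers rows c = cutAux (goodCol headers rows) c := by
  induction c with
  | zero => rfl
  | succ c ih =>
    show (if !((headers.getD c "" == "") || (PySem.Str.strip (headers.getD c "") == "")) then c + 1
          else if !(rows.all fun row => decide (row.length ≤ c) || (row.getD c none == none)) then c + 1
          else stripLoopA headers rows c)
        = if goodCol headers rows c then c + 1 else cutAux (goodCol headers rows) c
    rw [goodCol_eq, ih]
    cases (!((headers.getD c "" == "") || (PySem.Str.strip (headers.getD c "") == ""))) <;>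
      cases (!(rows.all fun row => decide (row.length ≤ c) || (row.getD c none == none))) <;> simp

-- B's inner per-row fold preserves the length of the table
theorem innerFold_length (row : List (Option String)) (m : Nat) (acc : List Bool) :
    ((List.range m).foldl (fun acc j => if (row.getD j none).isSome then acc.set j true else acc) acc).length = acc.length := by
  induction m generalizing acc with
  | zero => rfl
  | succ m ih =>
    rw [List.range_succ, List.foldl_append, List.foldl_cons, List.foldl_nil]
    split
    · rw [List.length_set]; exact ih acc
    · exact ih acc

theorem innerFold_getD (row : List (Option String)) (m : Nat) (acc : List Bool) (j : Nat)
    (hm : m ≤ acc.length) :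
    ((List.range m).foldl (fun acc j => if (row.getD j none).isSome then acc.set j true else acc) acc).getD j false
      = (acc.getD j false || (decide (j < m) && (row.getD j none).isSome)) := by
  induction m generalizing acc with
  | zero => simp
  | succ m ih =>
    have hm' : m ≤ acc.length := Nat.le_of_succ_le hm
    rw [List.range_succ, List.foldl_append]
    simp only [List.foldl_cons, List.foldl_nil]
    by_cases hjm : j = m
    · subst hjm
      by_cases hs : (row.getD j none).isSome
      · rw [if_pos hs]
        have hj : j < ((List.range j).foldl (fun acc k => if (row.getD k none).isSome then acc.set k true else acc) acc).length := by
          rw [innerFold_length]; exact Nat.lt_of_lt_of_le (Nat.lt_succ_self j) hm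
        rw [List.getD_eq_getElem?_getD] at hs
        rw [List.getD_eq_getElem?_getD, List.getElem?_set_self hj]
        simp [hs]
      · have hn : row.getD j none = none := Option.not_isSome_iff_eq_none.mp (by simpa using hs)
        rw [if_neg hs, ih _ hm']
        rw [List.getD_eq_getElem?_getD] at hn
        simp [hn]
    · have hstep : ∀ l : List Bool,
          (if (row.getD m none).isSome then l.set m true else l).getD j false = l.getD j false := by
        intro l
        split
        · simp [List.getD_eq_getElem?_getD, List.getElem?_set_ne (Ne.symm hjm)]
        · rfl
      rw [hstep, ih _ hm']
      have hd : decide (j < m + 1) = decide (j < m) := decide_eq_decide.mpr (by omega)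
      rw [hd]

-- the whole table: colHasData[j] ↔ some row has a value at j (within the first n columns)
theorem colHasData_getD (n : Nat) (rows : List (List (Option String))) (j : Nat) (acc : List Bool)
    (hlen : acc.length = n) :
    ((rows.foldl
        (fun acc row =>
          (List.range (min n row.length)).foldl
            (fun acc j => if (row.getD j none).isSome then acc.set j true else acc) acc)
        acc).getD j false)
      = (acc.getD j false || rows.any (fun row => decide (j < min n row.length) && (row.getD j none).isSome)) := by
  induction rows generalizing acc with
  | nil => simp
  | cons r rs ih =>
    simp only [List.foldl_cons, List.any_cons]
    have hmin : min n r.length ≤ acc.length := by rw [hlen]; exact Nat.min_le_left _ _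
    rw [ih _ (by rw [innerFold_length, hlen]), innerFold_getD r _ acc j hmin, Bool.or_assoc]

-- B's forward cut scan is cutAux
theorem cutFold_eq_cutAux (p : Nat → Bool) (n : Nat) :
    (List.range n).foldl (fun cut j => if p j then j + 1 else cut) 0 = cutAux p n := by
  induction n with
  | zero => rfl
  | succ n ih =>
    rw [List.range_succ, List.foldl_append]
    simp only [List.foldl_cons, List.foldl_nil, cutAux, ih]

theorem cutAux_congr (p q : Nat → Bool) (n : Nat) (h : ∀ j < n, p j = q j) :
    cutAux p n = cutAux q n := by
  induction n with
  | zero => rfl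
  | succ n ih =>
    simp only [cutAux, h n (Nat.lt_succ_self n),
      ih (fun j hj => h j (Nat.lt_succ_of_lt hj))]

-- ===== VERDICT (by name: the statement is the Claim_ definition above) =====
theorem strip_trailing_none_columns_spec : Claim_equal_strip_trailing_none_columns := by
  intro headers rows _
  unfold Spec_strip_trailing_none_columns strip_trailing_none_columns strip_trailing_none_columns_alt
  by_cases hh : headers = []
  · simp [hh]
  · simp only [if_neg hh]
    have hcut : stripLoopA headers rows headers.length
        = (List.range headers.length).foldl
            (fun cut j =>
              if ((headers.getD j "" != "") && (PySem.Str.strip (headers.getD j "") != ""))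
                  || (rows.foldl
                        (fun acc row =>
                          (List.range (min headers.length row.length)).foldl
                            (fun acc j => if (row.getD j none).isSome then acc.set j true else acc) acc)
                        (List.replicate headers.length false)).getD j false
              then j + 1 else cut) 0 := by
      rw [stripLoopA_eq_cutAux, cutFold_eq_cutAux]
      apply cutAux_congr
      intro j hj
      rw [colHasData_getD headers.length rows j _ (List.length_replicate)]
      have hrep : (List.replicate headers.length false).getD j false = false := by
        rw [List.getD_eq_getElem?_getD, List.getElem?_replicate]
        split <;> rfl
      rw [hrep, Bool.false_or]
      unfold goodCol
      congr 1
      refine List.any_congr rfl (fun row => ?_)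
      have : decide (j < row.length) = decide (j < min headers.length row.length) := by
        apply decide_eq_decide.mpr
        omega
      rw [this]
    rw [hcut]
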